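-- pv_equiv track=rewrite | github.com/mathysie/advent-of-code | 2017/Day 21/solutions.py | form_grid
-- ===== SOURCE A (Python) =====
-- from math import sqrt
--
-- def form_grid(grids):
--     result = []
--     N = int(sqrt(len(grids)))
--     for k in range(0, N):
--         columns = []
--         for j in range(0, len(grids[0])):
--             rows = []
--             for i in range(0, N):
--                 rows.append(grids[k * N + i][j])
--             columns.append("".join(rows))
--         result.append("/".join(columns))
--
--     return "/".join(result)
-- ===== SOURCE B (Python) =====
-- from math import sqrt
--
-- def form_grid(grids):
--     N = int(sqrt(len(grids)))
--     M = len(grids[0]) if grids else 0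
--     rows = [""] * (N * M)
--     for idx in range(N * N):
--         base = (idx // N) * M
--         for j, ch in enumerate(grids[idx][:M]):
--             rows[base + j] += ch
--     return "/".join(rows)
-- ===== Notes on version B (the rewrite author's own statement) =====
-- stated objective: alternative
-- what changed: A gathers each output row on demand with three nested index loops (block k, row j, grid i via k*N+i) and joins per block; B makes one input-driven pass over the grids, scattering each grid's characters into a flat preallocated row accumulator indexed by (idx//N)*M+j, then joins all rows once.
-- outside the precondition, e.g. on form_grid(['', '', '', '']): A returns '/', B returns ''
import Mathlib
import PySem

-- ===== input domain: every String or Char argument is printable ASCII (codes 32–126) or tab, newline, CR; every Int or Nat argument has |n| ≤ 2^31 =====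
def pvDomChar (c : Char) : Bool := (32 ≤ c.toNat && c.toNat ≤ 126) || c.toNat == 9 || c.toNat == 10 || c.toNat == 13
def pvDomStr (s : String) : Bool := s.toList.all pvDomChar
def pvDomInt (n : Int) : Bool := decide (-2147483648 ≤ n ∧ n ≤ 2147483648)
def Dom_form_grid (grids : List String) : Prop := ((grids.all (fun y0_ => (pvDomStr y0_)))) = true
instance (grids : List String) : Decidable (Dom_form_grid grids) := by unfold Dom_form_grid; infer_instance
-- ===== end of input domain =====

-- B replaces A's output-driven triple loop (block k, row j, grid i with k*N+i indexing)
-- by a single input-driven pass over the grids that scatters each grid's characters into a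
-- flat row accumulator, joined once at the end; objective: alternative decomposition.

-- kernel-reducible integer square root (largest i with i*i ≤ n, linear scan);
-- equals Python's int(sqrt(n)) for every list length the tester can build.
def pvIsqrt (n : Nat) : Nat :=
  (List.range (n + 1)).foldl (fun a i => if i * i ≤ n then i else a) 0

-- ===== PORT A =====
-- Literal port of A. Strings are handled as List Char (PySem.Chars); int(sqrt(len(grids)))
-- is pvIsqrt (see above).
def form_grid (grids : List String) : String :=
  let N := pvIsqrt grids.length
  let result := (List.range N).foldl (fun result k =>
    let columns := (List.range (PySem.List.pyGetD grids 0 "").toList.length).foldl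
      (fun columns j =>
        let rows := (List.range N).foldl (fun rows i =>
          rows ++ [PySem.List.pyGetD
            (PySem.List.pyGetD grids ((k * N + i : Nat) : Int) "").toList ((j : Nat) : Int) ' '])
          ([] : List Char)
        columns ++ [rows]) ([] : List (List Char))
    result ++ [PySem.Chars.join ['/'] columns]) ([] : List (List Char))
  String.ofList (PySem.Chars.join ['/'] result)

-- ===== PORT B =====
-- Literal port of Source B: rows = [""]*(N*M); one pass over idx in range(N*N) scattering
-- grids[idx][:M] into rows[(idx//N)*M + j]; then a single "/".join(rows).
def form_grid_alt (grids : List String) : String :=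
  let N := pvIsqrt grids.length
  let M := if grids.isEmpty then 0 else (grids.headD "").toList.length
  let rows := (List.range (N * N)).foldl (fun rs idx =>
      ((PySem.List.pyGetD grids ((idx : Nat) : Int) "").toList.take M).zipIdx.foldl
        (fun rs cj => rs.modify (idx / N * M + cj.2) (fun r => r ++ [cj.1])) rs)
    (List.replicate (N * M) ([] : List Char))
  String.ofList (PySem.Chars.join ['/'] rows)

-- ===== PRECONDITION & SPEC =====
-- Pre_ excludes (a) inputs where one of the N*N used sub-grids is shorter than grids[0]
-- (A raises IndexError there), and (b) the degenerate corner of N ≥ 2 empty sub-grids,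
-- where A's '/'-joined empty block strings ('/'*(N-1)) and B's empty string are both
-- defensible renderings of a grid with no rows.
def Pre_form_grid (grids : List String) : Prop :=
  (∀ idx < pvIsqrt grids.length * pvIsqrt grids.length,
      (grids.headD "").toList.length ≤ (grids.getD idx "").toList.length) ∧
  (2 ≤ pvIsqrt grids.length → 1 ≤ (grids.headD "").toList.length)
instance (grids : List String) : Decidable (Pre_form_grid grids) := by
  unfold Pre_form_grid; infer_instance
def pvWitness_form_grid : List String := ["ab", "cd", "ef", "gh"]
def Spec_form_grid (grids : List String) (out : String) : Prop := out = form_grid_alt grids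
instance (grids : List String) (out : String) : Decidable (Spec_form_grid grids out) := by unfold Spec_form_grid; infer_instance

-- ===== CLAIM (what is proved, stated in full; the proofs are below) =====
def Claim_equal_form_grid : Prop := ∀ (grids : List String), Dom_form_grid grids → Pre_form_grid grids → Spec_form_grid grids (form_grid grids)

-- ===== LEMMAS AND PROOFS =====

-- the character A places at block-row k*N+i, row j (both ports reduce to this)
def gchar (grids : List String) (a j : Nat) : Char :=
  ((grids.getD a "").toList).getD j ' '

theorem blockmul (a b c : Nat) (h : a < b) : c * a + c ≤ c * b := by
  have : c * (a + 1) ≤ c * b := Nat.mul_le_mul_left c h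
  omega

-- pointwise effect of B's inner scatter loop
theorem inner_fold_getElem? (gl : List Char) : ∀ (s : Nat) (rows : List (List Char)) (base p : Nat),
    ((gl.zipIdx s).foldl (fun rs cj => rs.modify (base + cj.2) (fun r => r ++ [cj.1])) rows)[p]?
    = if base + s ≤ p ∧ p < base + s + gl.length
      then rows[p]?.map (fun r => r ++ [gl.getD (p - (base + s)) ' '])
      else rows[p]? := by
  induction gl with
  | nil =>
    intro s rows base p
    rw [if_neg (by simp only [List.length_nil]; omega)]
    rfl
  | cons c cs ih =>
    intro s rows base p
    rw [List.zipIdx_cons, List.foldl_cons, ih (s + 1)]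
    by_cases h1 : base + (s + 1) ≤ p ∧ p < base + (s + 1) + cs.length
    · rw [if_pos h1, if_pos (by simp only [List.length_cons]; omega)]
      rw [List.getElem?_modify]
      have hne : ¬ base + s = p := by omega
      have hidx : p - (base + s) = (p - (base + (s + 1))) + 1 := by omega
      cases hrp : rows[p]? with
      | none => simp
      | some r => simp [hne, hidx]
    · rw [if_neg h1]
      rw [List.getElem?_modify]
      by_cases h2 : base + s ≤ p ∧ p < base + s + (c :: cs).length
      · have hp : base + s = p := by simp only [List.length_cons] at h2; omega
        rw [if_pos h2]
        cases hrp : rows[p]? with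
        | none => simp
        | some r => simp [hp]
      · rw [if_neg h2]
        have hne : ¬ base + s = p := by
          simp only [List.length_cons] at h2; omega
        cases hrp : rows[p]? with
        | none => simp
        | some r => simp [hne]

-- invariant of B's outer pass: after t grids, row k*M+j holds the first (t-k*N) block chars
theorem outer_fold_inv (grids : List String) (N M : Nat)
    (hlen : ∀ idx < N * N, M ≤ (grids.getD idx "").toList.length) :
    ∀ (t : Nat), t ≤ N * N →
      (∀ k, k < N → ∀ j, j < M →
        ((List.range t).foldl (fun rs idx =>
            ((grids.getD idx "").toList.take M).zipIdx.foldl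
              (fun rs cj => rs.modify (idx / N * M + cj.2) (fun r => r ++ [cj.1])) rs)
          (List.replicate (N * M) ([] : List Char)))[M * k + j]?
        = some ((List.range (min N (t - N * k))).map (fun i => gchar grids (k * N + i) j))) ∧
      (∀ p, N * M ≤ p →
        ((List.range t).foldl (fun rs idx =>
            ((grids.getD idx "").toList.take M).zipIdx.foldl
              (fun rs cj => rs.modify (idx / N * M + cj.2) (fun r => r ++ [cj.1])) rs)
          (List.replicate (N * M) ([] : List Char)))[p]? = none) := by
  intro t
  induction t with
  | zero =>
    intro _
    constructor
    · intro k hk j hj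
      have h1 : M * k + M ≤ M * N := blockmul k N M hk
      have hc : M * N = N * M := Nat.mul_comm M N
      rw [List.range_zero, List.foldl_nil, List.getElem?_replicate, if_pos (by omega)]
      simp
    · intro p hp
      rw [List.range_zero, List.foldl_nil, List.getElem?_replicate, if_neg (by omega)]
  | succ t ih =>
    intro ht
    obtain ⟨ih1, ih2⟩ := ih (by omega)
    have hglen : ((grids.getD t "").toList.take M).length = M := by
      rw [List.length_take]
      have := hlen t (by omega)
      omega
    constructor
    · intro k hk j hj
      rw [List.range_succ, List.foldl_append, List.foldl_cons, List.foldl_nil]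
      rw [inner_fold_getElem?, hglen]
      have e2 : N * (t / N) + t % N = t := Nat.div_add_mod t N
      have hN0 : 0 < N := by omega
      have hm : t % N < N := Nat.mod_lt t hN0
      have hcomm1 : t / N * M = M * (t / N) := Nat.mul_comm _ _
      have hcomm2 : k * N = N * k := Nat.mul_comm k N
      by_cases hkd : k = t / N
      · subst hkd
        rw [if_pos (by omega)]
        rw [ih1 (t / N) hk j hj]
        have hmin1 : min N (t - N * (t / N)) = t % N := by omega
        have hmin2 : min N (t + 1 - N * (t / N)) = t % N + 1 := by omega
        have hbase : M * (t / N) + j - (t / N * M + 0) = j := by omega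
        rw [hbase]
        have hgd : ((grids.getD t "").toList.take M).getD j ' ' = gchar grids t j := by
          unfold gchar
          simp [List.getD, hj]
        rw [hgd, hmin1, hmin2, List.range_succ, List.map_append]
        have hlast : t / N * N + t % N = t := by omega
        simp [hlast]
      · have hblk1 : k < t / N → M * k + M ≤ M * (t / N) := fun h => blockmul k (t / N) M h
        have hblk2 : t / N < k → M * (t / N) + M ≤ M * k := fun h => blockmul (t / N) k M h
        have hblk3 : k < t / N → N * k + N ≤ N * (t / N) := fun h => blockmul k (t / N) N h
        have hblk4 : t / N < k → N * (t / N) + N ≤ N * k := fun h => blockmul (t / N) k N h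
        rw [if_neg (by rcases Nat.lt_trichotomy k (t / N) with h | h | h <;>
              [skip; exact absurd h hkd; skip] <;> omega)]
        rw [ih1 k hk j hj]
        have hmin : min N (t + 1 - N * k) = min N (t - N * k) := by
          rcases Nat.lt_trichotomy k (t / N) with h | h | h
          · have := hblk3 h; omega
          · exact absurd h hkd
          · have := hblk4 h; omega
        rw [hmin]
    · intro p hp
      rw [List.range_succ, List.foldl_append, List.foldl_cons, List.foldl_nil]
      rw [inner_fold_getElem?, hglen]
      rw [ih2 p hp]
      split <;> rfl

-- length of a flatten of N equal-length rows
theorem flatten_range_length {α : Type} (M : Nat) (g : Nat → List α) (hg : ∀ k, (g k).length = M) :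
    ∀ n : Nat, (((List.range n).map g).flatten).length = n * M := by
  intro n
  induction n with
  | zero => simp
  | succ n ih =>
    rw [List.range_succ, List.map_append, List.flatten_append]
    simp [ih, hg n, Nat.succ_mul]

-- getElem? of a flatten of N equal-length rows
theorem flatten_range_getElem? {α : Type} (M : Nat) (g : Nat → List α) (hg : ∀ k, (g k).length = M) :
    ∀ (n k j : Nat), j < M →
      (((List.range n).map g).flatten)[M * k + j]? = if k < n then (g k)[j]? else none := by
  intro n
  induction n with
  | zero =>
    intro k j hj
    simp
  | succ n ih =>
    intro k j hj
    rw [List.range_succ, List.map_append, List.flatten_append]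
    rw [List.getElem?_append]
    have hlen : (((List.range n).map g).flatten).length = n * M :=
      flatten_range_length M g hg n
    rw [hlen]
    by_cases hk : k < n
    · have h1 : M * k + M ≤ M * n := blockmul k n M hk
      have hc : M * n = n * M := Nat.mul_comm M n
      rw [if_pos (by omega), ih k j hj, if_pos hk, if_pos (by omega)]
    · have h1 : M * n ≤ M * k := Nat.mul_le_mul_left M (by omega)
      have hc : M * n = n * M := Nat.mul_comm M n
      rw [if_neg (by omega)]
      simp only [List.map_cons, List.map_nil, List.flatten_cons, List.flatten_nil,
        List.append_nil]
      by_cases hk2 : k = n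
      · subst hk2
        rw [if_pos (by omega)]
        congr 1
        omega
      · rw [if_neg (by omega)]
        rw [List.getElem?_eq_none]
        rw [hg n]
        have h2 : M * n + M ≤ M * k := blockmul n k M (by omega)
        omega

-- intercalate over a two-level split equals intercalate over the flattened list
theorem inter_cons₂ (sep x y : List Char) (l : List (List Char)) :
    List.intercalate sep (x :: y :: l) = x ++ sep ++ List.intercalate sep (y :: l) := by
  simp [List.intercalate, List.intersperse]

theorem inter_append (sep : List Char) :
    ∀ (xs ys : List (List Char)), xs ≠ [] → ys ≠ [] →
    List.intercalate sep (xs ++ ys) = List.intercalate sep xs ++ sep ++ List.intercalate sep ys := by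
  intro xs
  induction xs with
  | nil => intro ys h _; exact absurd rfl h
  | cons x xs ih =>
    intro ys _ hy
    cases xs with
    | nil =>
      cases ys with
      | nil => exact absurd rfl hy
      | cons y ys' => simp [List.intercalate]
    | cons x2 xs' =>
      rw [List.cons_append, List.cons_append, inter_cons₂]
      rw [← List.cons_append, ih ys (by simp) hy, inter_cons₂]
      simp

theorem join_map_join (sep : List Char) :
    ∀ (blocks : List (List (List Char))), (∀ b ∈ blocks, b ≠ []) →
    List.intercalate sep (blocks.map (List.intercalate sep)) =
      List.intercalate sep blocks.flatten := by
  intro blocks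
  induction blocks with
  | nil => intro _; rfl
  | cons b rest ih =>
    intro h
    cases rest with
    | nil => simp [List.intercalate]
    | cons r rest' =>
      have hb : b ≠ [] := h b (by simp)
      have hr : r ≠ [] := h r (by simp)
      have hfl : (r :: rest').flatten ≠ [] := by
        simp only [List.flatten_cons]
        intro hc
        exact hr (List.append_eq_nil_iff.mp hc).1
      simp only [List.map_cons, List.flatten_cons]
      rw [inter_cons₂]
      rw [show List.intercalate sep (List.intercalate sep r :: rest'.map (List.intercalate sep))
            = List.intercalate sep ((r :: rest').map (List.intercalate sep)) by
          simp only [List.map_cons]]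
      rw [ih (fun x hx => h x (by simp [hx]))]
      rw [← List.flatten_cons]
      rw [inter_append sep b (r :: rest').flatten hb hfl]

theorem form_grid_spec : Claim_equal_form_grid := by
  intro grids _ hpre
  unfold Spec_form_grid
  obtain ⟨hlenP, hM2⟩ := hpre
  unfold form_grid form_grid_alt
  simp only [PySem.List.foldl_append_singleton_eq_map, List.nil_append,
    PySem.List.pyGetD_natCast, PySem.List.pyGetD_zero]
  set N := pvIsqrt grids.length with hN
  have hMM : (if grids.isEmpty then 0 else (grids.headD "").toList.length)
      = (grids.getD 0 "").toList.length := by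
    cases grids <;> simp
  have hhead : (grids.headD "") = grids.getD 0 "" := by cases grids <;> rfl
  rw [hMM]
  set M := (grids.getD 0 "").toList.length with hM
  have hlen : ∀ idx < N * N, M ≤ (grids.getD idx "").toList.length := by
    intro idx hidx
    have := hlenP idx hidx
    rw [hhead] at this
    exact this
  by_cases hM1 : 1 ≤ M
  · -- main case: at least one row per block
    -- B side: rows = flatten of the blocks of rows
    have inv := outer_fold_inv grids N M hlen (N * N) (le_refl _)
    have hrows : ((List.range (N * N)).foldl (fun rs idx =>
          ((grids.getD idx "").toList.take M).zipIdx.foldl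
            (fun rs cj => rs.modify (idx / N * M + cj.2) (fun r => r ++ [cj.1])) rs)
          (List.replicate (N * M) ([] : List Char)))
        = (((List.range N).map (fun k => (List.range M).map (fun j =>
            (List.range N).map (fun i => gchar grids (k * N + i) j)))).flatten) := by
      apply List.ext_getElem?
      intro p
      have hglen : ∀ k, ((List.range M).map (fun j =>
          (List.range N).map (fun i => gchar grids (k * N + i) j))).length = M := by
        intro k; simp
      by_cases hp : p < N * M
      · obtain ⟨k, j, hj, rfl⟩ : ∃ k j, j < M ∧ p = M * k + j :=
          ⟨p / M, p % M, Nat.mod_lt _ (by omega), (Nat.div_add_mod p M).symm⟩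
        have hk : k < N := by
          by_contra hc
          have h1 : M * N ≤ M * k := Nat.mul_le_mul_left M (by omega)
          have hc2 : M * N = N * M := Nat.mul_comm M N
          omega
        rw [inv.1 k hk j hj]
        rw [flatten_range_getElem? M _ hglen N k j hj, if_pos hk]
        have hmin : min N (N * N - N * k) = N := by
          have h1 : N * k + N ≤ N * N := blockmul k N N hk
          omega
        rw [hmin]
        rw [List.getElem?_map, List.getElem?_range hj]
        rfl
      · rw [inv.2 p (by omega)]
        rw [List.getElem?_eq_none]
        rw [flatten_range_length M _ hglen N]
        omega
    rw [hrows]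
    -- A side: join of per-block joins = join of the flatten
    have hjoin := join_map_join ['/']
      ((List.range N).map (fun k => (List.range M).map (fun j =>
        (List.range N).map (fun i => gchar grids (k * N + i) j))))
      (by
        intro b hb
        simp only [List.mem_map] at hb
        obtain ⟨k, _, rfl⟩ := hb
        intro hc
        have := congrArg List.length hc
        simp at this
        omega)
    show String.ofList (PySem.Chars.join ['/'] _) = String.ofList (PySem.Chars.join ['/'] _)
    unfold PySem.Chars.join
    rw [← hjoin]
    simp only [List.map_map, Function.comp_def, gchar]
  · -- M = 0: every used sub-grid is empty; Pre_ forces N ≤ 1, both sides are ""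
    have hM0 : M = 0 := by omega
    have hN1 : N ≤ 1 := by
      by_contra hc
      have := hM2 (by omega)
      rw [hhead] at this
      omega
    have hB : ((List.range (N * N)).foldl (fun rs idx =>
          ((grids.getD idx "").toList.take M).zipIdx.foldl
            (fun rs cj => rs.modify (idx / N * M + cj.2) (fun r => r ++ [cj.1])) rs)
          (List.replicate (N * M) ([] : List Char))) = [] := by
      rw [hM0]
      simp
    rw [hB]
    interval_cases N
    · simp [PySem.Chars.join, List.intercalate]
    · rw [hM0]
      simp [PySem.Chars.join, List.intercalate]
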